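-- pv_equiv track=rewrite | github.com/mharbaugh0/CS1210-All | wps3.py | numberOfDays
-- ===== SOURCE A (Python) =====
-- def numberOfDays(m):
--     # Initialization
--     monthIndex = 1 # variable representing the current month
--     daysElapsed = 0 # an accumulator variable to which we will add days in each month
--
--     # This loop runs through all months 1 through m
--     reducedM = min(m, 12)
--     while (monthIndex <= reducedM):
--     # monthIndex is the current month and depending on what the monthIndex is, we assign
--     # to a variable called daysInMonth, the number of days in the current month
--         if (monthIndex == 4) or (monthIndex == 6) or (monthIndex == 9) or (monthIndex == 11):
--             daysInMonth = 30
--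
--         elif (monthIndex == 2):
--             daysInMonth = 28
--
--         else:
--             daysInMonth = 31
--
--         # Update the accumulator variable by adding the days in the current month
--         daysElapsed = daysElapsed + daysInMonth
--
--         # Increment the monthIndex
--         monthIndex = monthIndex + 1
--
--     return daysElapsed
-- ===== SOURCE B (Python) =====
-- def numberOfDays(m):
--     # Cumulative days elapsed at the end of each month (non-leap year).
--     cum = [0, 31, 59, 90, 120, 151, 181, 212, 243, 273, 304, 334, 365]
--     idx = min(max(m, 0), 12)
--     return cum[idx]
-- ===== Notes on version B (the rewrite author's own statement) =====
-- stated objective: simpler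
-- what changed: Replaced the accumulate-and-branch while loop with a fixed cumulative prefix-sum table indexed by the month count clamped to [0,12].
import Mathlib
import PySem

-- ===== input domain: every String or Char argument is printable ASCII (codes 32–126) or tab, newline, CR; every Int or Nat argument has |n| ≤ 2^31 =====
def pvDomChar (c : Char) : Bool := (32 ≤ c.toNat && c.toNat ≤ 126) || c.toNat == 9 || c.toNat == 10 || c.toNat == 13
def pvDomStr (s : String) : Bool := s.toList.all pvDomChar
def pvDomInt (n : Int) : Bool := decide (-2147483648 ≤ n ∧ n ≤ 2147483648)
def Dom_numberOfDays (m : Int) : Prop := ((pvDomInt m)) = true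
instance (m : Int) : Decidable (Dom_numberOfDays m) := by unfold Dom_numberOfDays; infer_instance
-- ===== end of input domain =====

set_option maxRecDepth 4000


-- B replaces A's accumulate-and-branch loop with a fixed cumulative table lookup (simpler).

-- ===== PORT A =====
-- the while loop of A: state (monthIndex, daysElapsed); runs while monthIndex ≤ reducedM
def numberOfDaysLoop (reducedM monthIndex daysElapsed : Int) : Int :=
  if monthIndex ≤ reducedM then
    let daysInMonth : Int :=
      if monthIndex = 4 ∨ monthIndex = 6 ∨ monthIndex = 9 ∨ monthIndex = 11 then 30
      else if monthIndex = 2 then 28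
      else 31
    numberOfDaysLoop reducedM (monthIndex + 1) (daysElapsed + daysInMonth)
  else daysElapsed
termination_by (reducedM + 1 - monthIndex).toNat
decreasing_by omega

def numberOfDays (m : Int) : Int :=
  numberOfDaysLoop (min m 12) 1 0

-- ===== PORT B =====
-- cum[idx]: idx = min(max(m,0),12) is always in range 0..12, so plain list indexing
-- (ported as getD with .toNat, exact since 0 ≤ idx ≤ 12 < length cum).
def numberOfDays_alt (m : Int) : Int :=
  let cum : List Int := [0, 31, 59, 90, 120, 151, 181, 212, 243, 273, 304, 334, 365]
  let idx : Int := min (max m 0) 12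
  cum.getD idx.toNat 0

-- ===== PRECONDITION & SPEC =====
def Spec_numberOfDays (m : Int) (out : Int) : Prop := out = numberOfDays_alt m
instance (m : Int) (out : Int) : Decidable (Spec_numberOfDays m out) := by unfold Spec_numberOfDays; infer_instance

-- ===== CLAIM (what is proved, stated in full; the proofs are below) =====
def Claim_equal_numberOfDays : Prop := ∀ (m : Int), Dom_numberOfDays m → Spec_numberOfDays m (numberOfDays m)

-- ===== LEMMAS AND PROOFS =====

theorem numberOfDays_nonpos (m : Int) (h : m ≤ 0) : numberOfDays m = 0 := by
  unfold numberOfDays numberOfDaysLoop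
  rw [if_neg (by omega)]

theorem numberOfDays_alt_nonpos (m : Int) (h : m ≤ 0) : numberOfDays_alt m = 0 := by
  unfold numberOfDays_alt
  have : max m 0 = 0 := by omega
  simp [this]

theorem numberOfDays_ge12 (m : Int) (h : 12 ≤ m) : numberOfDays m = 365 := by
  unfold numberOfDays
  have : min m 12 = 12 := by omega
  rw [this]
  repeat (rw [numberOfDaysLoop]; norm_num)

theorem numberOfDays_alt_ge12 (m : Int) (h : 12 ≤ m) : numberOfDays_alt m = 365 := by
  unfold numberOfDays_alt
  have h1 : max m 0 = m := by omega
  have h2 : min m 12 = 12 := by omega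
  simp [h1, h2]

-- ===== VERDICT (by name: the statement is the Claim_ definition above) =====
theorem numberOfDays_spec : Claim_equal_numberOfDays := by
  intro m _
  unfold Spec_numberOfDays
  by_cases h : m ≤ 0
  · rw [numberOfDays_nonpos m h, numberOfDays_alt_nonpos m h]
  · by_cases h2 : 12 ≤ m
    · rw [numberOfDays_ge12 m h2, numberOfDays_alt_ge12 m h2]
    · have h3 : 1 ≤ m := by omega
      have h4 : m ≤ 11 := by omega
      interval_cases m <;>
        (unfold numberOfDays numberOfDays_alt; norm_num; (repeat (rw [numberOfDaysLoop]; norm_num)); try decide)
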